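-- pv_equiv track=rewrite | github.com/waynesun09/cicaddy | src/cicaddy/reports/html_formatter.py | _trim_json_terminator
-- ===== SOURCE A (Python) =====
-- def _trim_json_terminator(text: str) -> str:
--     """Trim trailing narrative after final closing brace/bracket."""
--     stack = []
--     last_valid_index = None
--     for idx, ch in enumerate(text):
--         if ch in "{[":
--             stack.append(ch)
--         elif ch in "}]":
--             if stack:
--                 stack.pop()
--             last_valid_index = idx
--
--         # Early exit if we've closed everything
--         if not stack and last_valid_index is not None and ch in "}]":
--             remainder = text[last_valid_index + 1 :].strip()
--             if remainder:
--                 continue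
--
--     if last_valid_index is not None:
--         return text[: last_valid_index + 1].strip()
--
--     return text
-- ===== SOURCE B (Python) =====
-- def _trim_json_terminator(text: str) -> str:
--     """Trim trailing narrative after final closing brace/bracket."""
--     i = max(text.rfind("}"), text.rfind("]"))
--     if i != -1:
--         return text[: i + 1].strip()
--     return text
-- ===== Notes on version B (the rewrite author's own statement) =====
-- stated objective: faster
-- what changed: Replaces A's forward character loop with its bracket stack (whose pushes/pops never affect the result) by two backward library scans (str.rfind for each closing character) and a single guard.
import Mathlib
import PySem

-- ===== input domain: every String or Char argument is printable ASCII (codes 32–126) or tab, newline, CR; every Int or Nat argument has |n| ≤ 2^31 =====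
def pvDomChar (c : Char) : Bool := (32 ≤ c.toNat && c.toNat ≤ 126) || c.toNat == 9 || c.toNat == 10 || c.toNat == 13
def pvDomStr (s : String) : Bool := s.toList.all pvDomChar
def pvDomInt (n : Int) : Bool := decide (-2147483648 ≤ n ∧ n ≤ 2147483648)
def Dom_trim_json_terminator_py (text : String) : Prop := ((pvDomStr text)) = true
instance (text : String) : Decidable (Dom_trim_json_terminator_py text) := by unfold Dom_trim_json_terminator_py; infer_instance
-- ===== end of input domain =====

-- B replaces A's forward loop with its never-used bracket stack by two backward
-- library scans (rfind) for the last '}' / ']' plus a guard; objective: simpler.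


-- ===== PORT A =====
-- one iteration of A's for-loop over (idx, ch); state = (stack, last_valid_index)
def trimStepA (text : String) (st : List Char × Option Int) (p : Int × Char) :
    List Char × Option Int :=
  let stack := st.1
  let last := st.2
  let idx := p.1
  let ch := p.2
  let st' :=
    if "{[".toList.contains ch then (ch :: stack, last)
    else if "}]".toList.contains ch then
      ((match stack with | [] => ([] : List Char) | _ :: t => t), some idx)
    else (stack, last)
  -- A's 'early exit' block: computes remainder and 'continue's either way — no effect on the state
  let _remainder :=
    if st'.1.isEmpty && st'.2.isSome && "}]".toList.contains ch then
      PySem.Str.strip (PySem.Str.slice text (some ((st'.2.getD 0) + 1)) none)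
    else ""
  st'

def trim_json_terminator_py (text : String) : String :=
  let res := (PySem.List.enumerate text.toList).foldl (trimStepA text) ([], none)
  match res.2 with
  | some i => PySem.Str.strip (PySem.Str.slice text none (some (i + 1)))
  | none => text

-- ===== PORT B =====
def trim_json_terminator_py_alt (text : String) : String :=
  let i := max (PySem.Str.rfind text "}") (PySem.Str.rfind text "]")
  if i ≠ -1 then PySem.Str.strip (PySem.Str.slice text none (some (i + 1)))
  else text

-- ===== PRECONDITION & SPEC =====
def Spec_trim_json_terminator_py (text : String) (out : String) : Prop := out = trim_json_terminator_py_alt text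
instance (text : String) (out : String) : Decidable (Spec_trim_json_terminator_py text out) := by unfold Spec_trim_json_terminator_py; infer_instance

-- ===== CLAIM (what is proved, stated in full; the proofs are below) =====
def Claim_equal_trim_json_terminator_py : Prop := ∀ (text : String), Dom_trim_json_terminator_py text → Spec_trim_json_terminator_py text (trim_json_terminator_py text)

-- ===== LEMMAS AND PROOFS =====

-- index of the LAST character satisfying p, defined structurally
def lastIdxP (p : Char → Bool) : List Char → Option Nat
  | [] => none
  | c :: t =>
    match lastIdxP p t with
    | some k => some (k + 1)
    | none => if p c then some 0 else none

def toI : Option Nat → Int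
  | none => -1
  | some k => k

def closer (c : Char) : Bool := c = '}' || c = ']'

theorem fold_snd (text : String) :
    ∀ (cs : List Char) (s : Int) (st : List Char × Option Int),
      ((PySem.List.enumerate cs s).foldl (trimStepA text) st).2
        = (match lastIdxP closer cs with
           | some k => some (s + k)
           | none => st.2) := by
  intro cs
  induction cs with
  | nil => intro s st; simp [PySem.List.enumerate, lastIdxP]
  | cons c t ih =>
    intro s st
    rw [PySem.List.enumerate_cons, List.foldl_cons, ih]
    by_cases h1 : c = '{' <;> by_cases h2 : c = '[' <;>
      by_cases h3 : c = '}' <;> by_cases h4 : c = ']' <;>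
      simp_all [trimStepA, lastIdxP, closer] <;>
      rcases lastIdxP closer t with _ | k <;> simp <;> ring

theorem lastIdxP_max :
    ∀ (cs : List Char),
      toI (lastIdxP closer cs)
        = max (toI (lastIdxP (fun c => c = '}') cs)) (toI (lastIdxP (fun c => c = ']') cs)) := by
  intro cs
  induction cs with
  | nil => simp [lastIdxP, toI]
  | cons c t ih =>
    by_cases h3 : c = '}' <;> by_cases h4 : c = ']' <;>
      simp_all [lastIdxP, closer] <;>
      rcases hb : lastIdxP closer t with _ | a <;>
      rcases hc : lastIdxP (fun c => c = '}') t with _ | b <;>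
      rcases hd : lastIdxP (fun c => c = ']') t with _ | d <;>
      simp_all [toI] <;> omega

theorem rfind_go_singleton (ch : Char) (s : List Char) :
    ∀ n, n ≤ s.length →
      PySem.Chars.rfind.go s [ch] n = toI (lastIdxP (fun c => c = ch) (s.take (n + 1))) := by
  intro n
  induction n with
  | zero =>
    intro _
    cases s with
    | nil => simp [PySem.Chars.rfind.go, lastIdxP, toI, List.isPrefixOf]
    | cons c t =>
      simp only [PySem.Chars.rfind.go, List.take_succ_cons, List.take_zero,
        List.isPrefixOf, List.drop_zero, lastIdxP]
      by_cases h : ch = c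
      · simp [h, toI]
      · have h' : ¬ (c = ch) := fun hh => h hh.symm
        simp [h, h', toI]
  | succ j ih =>
    intro hn
    have hj : j ≤ s.length := by omega
    show (if List.isPrefixOf [ch] (s.drop (j + 1)) then ((j : Int) + 1) else PySem.Chars.rfind.go s [ch] j) = _
    rcases Nat.lt_or_ge (j + 1) s.length with hlt | hge
    · have htake : s.take (j + 1 + 1) = s.take (j + 1) ++ [s[j + 1]] := by
        rw [List.take_add_one, List.getElem?_eq_getElem hlt]; rfl
      have hdrop : s.drop (j + 1) = s[j + 1] :: s.drop (j + 2) := by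
        rw [List.drop_eq_getElem_cons hlt]
      rw [htake, hdrop, ih hj]
      by_cases h : s[j + 1] = ch
      · have hp : List.isPrefixOf [ch] (s[j+1] :: s.drop (j+2)) = true := by
          simp [List.isPrefixOf, h]
        rw [if_pos hp]
        have : lastIdxP (fun c => c = ch) (s.take (j + 1) ++ [s[j+1]]) = some (s.take (j+1)).length := by
          clear hp hdrop htake ih
          generalize s.take (j+1) = xs
          induction xs with
          | nil => simp [lastIdxP, h]
          | cons y ys ihy => simp only [List.cons_append, lastIdxP, ihy, List.length_cons]
        rw [this]
        simp [toI, List.length_take, Nat.min_eq_left (by omega : j + 1 ≤ s.length)]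
      · have hp : List.isPrefixOf [ch] (s[j+1] :: s.drop (j+2)) = false := by
          simp [List.isPrefixOf]; exact fun hh => h hh.symm
        rw [if_neg (by rw [hp]; simp)]
        have : lastIdxP (fun c => c = ch) (s.take (j + 1) ++ [s[j+1]]) = lastIdxP (fun c => c = ch) (s.take (j + 1)) := by
          clear hp hdrop htake ih
          generalize s.take (j+1) = xs
          induction xs with
          | nil => simp [lastIdxP, h]
          | cons y ys ihy => simp only [List.cons_append, lastIdxP, ihy]
        rw [this]
    · have h1 : j + 1 = s.length := by omega
      have hdrop : s.drop (j + 1) = [] := by simp [h1]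
      have hp : List.isPrefixOf [ch] ([] : List Char) = false := by simp [List.isPrefixOf]
      rw [hdrop, if_neg (by simp [hp]), ih hj]
      have : s.take (j + 1 + 1) = s.take (j + 1) := by
        rw [List.take_of_length_le (by omega), List.take_of_length_le (by omega)]
      rw [this]

theorem rfind_singleton (s : List Char) (ch : Char) :
    PySem.Chars.rfind s [ch] = toI (lastIdxP (fun c => c = ch) s) := by
  show PySem.Chars.rfind.go s [ch] s.length = _
  rw [rfind_go_singleton ch s s.length (le_refl _), List.take_of_length_le (by omega)]

-- ===== VERDICT (by name: the statement is the Claim_ definition above) =====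
theorem trim_json_terminator_py_spec : Claim_equal_trim_json_terminator_py := by
  intro text _
  show trim_json_terminator_py text = trim_json_terminator_py_alt text
  unfold trim_json_terminator_py trim_json_terminator_py_alt
  have hr1 : PySem.Str.rfind text "}" = toI (lastIdxP (fun c => c = '}') text.toList) := by
    rw [PySem.Str.rfind_eq]; exact rfind_singleton _ _
  have hr2 : PySem.Str.rfind text "]" = toI (lastIdxP (fun c => c = ']') text.toList) := by
    rw [PySem.Str.rfind_eq]; exact rfind_singleton _ _
  have hf := fold_snd text text.toList 0 ([], none)
  have hm := lastIdxP_max text.toList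
  rw [hr1, hr2, ← hm]
  rcases hl : lastIdxP closer text.toList with _ | k <;> rw [hl] at hf hm
  · simp only [hf, toI]
    rw [if_neg (by omega : ¬ ((-1 : Int) ≠ -1))]
  · simp only [hf, toI]
    rw [if_pos (by omega : ((k : Int) ≠ -1))]
    norm_num
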